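-- pv_equiv track=rewrite | github.com/AlesKas/neural_networks | 0.py | solution
-- ===== SOURCE A (Python) =====
-- def solution(S):
--     solutionNum = 0
--     largesSubseq = 0
--     # Lenghts of subsequences
--     lengths = []
--     # Currently processed character
--     currentChar = None
--     # Counter for number of occurence of char
--     counter = 0
--     while (len(S) > 0):
--         # Get first char
--         char = S[0]
--         S = S[1:]
--         # First, set currentChar to first char of input
--         if currentChar is None:
--             currentChar = char
--         # If next occurence of same char is found, increase counter
--         if char == currentChar:
--             counter += 1
--         else:
--             if counter > largesSubseq:
--                 largesSubseq = counter
--             lengths.append(counter)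
--             currentChar = char
--             counter = 1
--         if (len(S) == 0):
--             if counter > largesSubseq:
--                 largesSubseq = counter
--             lengths.append(counter)
--
--     for length in lengths:
--         solutionNum += largesSubseq - length
--
--     return solutionNum
-- ===== SOURCE B (Python) =====
-- def solution(S):
--     # One linear pass: count runs and the max run length; answer = max_run * runs - len(S).
--     if not S:
--         return 0
--     max_run = 0
--     runs = 0
--     cur = 1
--     for a, b in zip(S, S[1:]):
--         if a == b:
--             cur += 1
--         else:
--             if cur > max_run:
--                 max_run = cur
--             runs += 1
--             cur = 1
--     if cur > max_run:
--         max_run = cur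
--     runs += 1
--     return max_run * runs - len(S)
-- ===== Notes on version B (the rewrite author's own statement) =====
-- stated objective: faster
-- what changed: A repeatedly slices S[1:] (O(n^2) copying) and collects the full list of run lengths before a second summation pass; B does one linear pass over adjacent character pairs keeping only the run count and maximal run length, returning max_run*runs - len(S).
import Mathlib
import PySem

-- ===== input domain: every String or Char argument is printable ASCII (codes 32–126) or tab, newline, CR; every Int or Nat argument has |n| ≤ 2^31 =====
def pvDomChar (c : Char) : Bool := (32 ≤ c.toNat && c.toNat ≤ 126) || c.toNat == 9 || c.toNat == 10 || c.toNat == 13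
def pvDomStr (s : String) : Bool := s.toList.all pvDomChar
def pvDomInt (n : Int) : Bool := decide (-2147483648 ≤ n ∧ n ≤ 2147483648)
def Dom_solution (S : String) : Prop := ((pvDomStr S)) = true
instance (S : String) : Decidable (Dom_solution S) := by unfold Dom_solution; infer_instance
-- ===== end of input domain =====

-- B replaces A's quadratic slice-rebuilding loop and run-length list by one linear pass
-- counting only the number of runs and the maximal run length (answer = max*runs - len(S)); objective: faster.


-- ===== PORT A =====
-- while-loop of A: state (remaining chars, largesSubseq, lengths, currentChar, counter);
-- the 'if len(S) == 0' flush of Python happens inside the step when the tail is empty.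
def solLoopA : List Char → Int → List Int → Option Char → Int → Int × List Int
  | [], largest, lengths, _, _ => (largest, lengths)
  | c :: rest, largest, lengths, currentChar, counter =>
    let cur := match currentChar with | none => c | some x => x
    if c == cur then
      let counter' := counter + 1
      match rest with
      | [] => ((if counter' > largest then counter' else largest), lengths ++ [counter'])
      | _ :: _ => solLoopA rest largest lengths (some cur) counter'
    else
      let largest' := if counter > largest then counter else largest
      let lengths' := lengths ++ [counter]
      match rest with
      | [] => ((if 1 > largest' then 1 else largest'), lengths' ++ [1])
      | _ :: _ => solLoopA rest largest' lengths' (some c) 1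

def solution (S : String) : Int :=
  let p := solLoopA S.toList 0 [] none 0
  p.2.foldl (fun acc l => acc + (p.1 - l)) 0

-- ===== PORT B =====
-- B's for-loop over zip(S, S[1:]): state (rest, prev char, current run length, max run, runs)
def solLoopB : List Char → Char → Int → Int → Int → Int × Int
  | [], _, cur, maxr, runs => ((if cur > maxr then cur else maxr), runs + 1)
  | c :: rest, prev, cur, maxr, runs =>
    if c == prev then solLoopB rest c (cur + 1) maxr runs
    else solLoopB rest c 1 (if cur > maxr then cur else maxr) (runs + 1)

def solution_alt (S : String) : Int :=
  match S.toList with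
  | [] => 0
  | c :: rest =>
    let p := solLoopB rest c 1 0 0
    p.1 * p.2 - (S.toList.length : Int)

-- ===== PRECONDITION & SPEC =====
def Spec_solution (S : String) (out : Int) : Prop := out = solution_alt S
instance (S : String) (out : Int) : Decidable (Spec_solution S out) := by unfold Spec_solution; infer_instance

-- ===== CLAIM (what is proved, stated in full; the proofs are below) =====
def Claim_equal_solution : Prop := ∀ (S : String), Dom_solution S → Spec_solution S (solution S)

-- ===== LEMMAS AND PROOFS =====

theorem foldl_sub (lens : List Int) (L acc : Int) :
    lens.foldl (fun a x => a + (L - x)) acc = acc + L * lens.length - lens.sum := by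
  induction lens generalizing acc with
  | nil => simp
  | cons x xs ih => simp only [List.foldl, ih, List.length_cons, List.sum_cons]; push_cast; ring

-- unfolding equations for the two loops (definitional)
theorem A_cc (c d p : Char) (l' : List Char) (largest counter : Int) (lengths : List Int) :
    solLoopA (c :: d :: l') largest lengths (some p) counter =
      if c == p then solLoopA (d :: l') largest lengths (some p) (counter + 1)
      else solLoopA (d :: l') (if counter > largest then counter else largest)
            (lengths ++ [counter]) (some c) 1 := rfl

theorem A_c1 (c p : Char) (largest counter : Int) (lengths : List Int) :
    solLoopA [c] largest lengths (some p) counter =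
      if c == p then ((if counter + 1 > largest then counter + 1 else largest), lengths ++ [counter + 1])
      else ((if 1 > (if counter > largest then counter else largest) then 1
             else (if counter > largest then counter else largest)),
            lengths ++ [counter] ++ [1]) := rfl

theorem B_cons (c prev : Char) (rest : List Char) (cur maxr runs : Int) :
    solLoopB (c :: rest) prev cur maxr runs =
      if c == prev then solLoopB rest c (cur + 1) maxr runs
      else solLoopB rest c 1 (if cur > maxr then cur else maxr) (runs + 1) := rfl

theorem B_nil (p : Char) (cur maxr runs : Int) :
    solLoopB [] p cur maxr runs = ((if cur > maxr then cur else maxr), runs + 1) := rfl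

theorem loopB_shift (l : List Char) : ∀ (p : Char) (cur maxr r : Int),
    solLoopB l p cur maxr r = ((solLoopB l p cur maxr 0).1, (solLoopB l p cur maxr 0).2 + r) := by
  induction l with
  | nil => intro p cur maxr r; simp only [B_nil]; congr 1; ring
  | cons c rest ih =>
    intro p cur maxr r
    by_cases h : (c == p) = true
    · rw [B_cons, if_pos h, B_cons, if_pos h, ih c (cur + 1) maxr r]
    · rw [B_cons, if_neg h, B_cons, if_neg h, ih _ 1 _ (r + 1), ih _ 1 _ (0 + 1)]
      congr 1; ring

theorem main_lemma (l : List Char) : ∀ (c p : Char) (counter largest : Int) (lengths : List Int),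
    (solLoopA (c :: l) largest lengths (some p) counter).1
      = (solLoopB (c :: l) p counter largest 0).1
    ∧ ((solLoopA (c :: l) largest lengths (some p) counter).2.length : Int)
      = (lengths.length : Int) + (solLoopB (c :: l) p counter largest 0).2
    ∧ (solLoopA (c :: l) largest lengths (some p) counter).2.sum
      = lengths.sum + counter + ((l.length : Int) + 1) := by
  induction l with
  | nil =>
    intro c p counter largest lengths
    by_cases h : (c == p) = true
    · refine ⟨?_, ?_, ?_⟩ <;> simp only [A_c1, B_cons, if_pos h, B_nil] <;> simp <;> ring
    · refine ⟨?_, ?_, ?_⟩ <;> simp only [A_c1, B_cons, if_neg h, B_nil] <;> simp <;> ring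
  | cons d l' ih =>
    intro c p counter largest lengths
    by_cases h : (c == p) = true
    · have hcp : c = p := beq_iff_eq.mp h
      subst hcp
      obtain ⟨h1, h2, h3⟩ := ih d c (counter + 1) largest lengths
      rw [A_cc, if_pos h, B_cons, if_pos h]
      refine ⟨h1, h2, ?_⟩
      rw [h3, List.length_cons]; push_cast; ring
    · obtain ⟨h1, h2, h3⟩ := ih d c 1 (if counter > largest then counter else largest)
        (lengths ++ [counter])
      have hs := loopB_shift (d :: l') c 1 (if counter > largest then counter else largest) (0 + 1)
      rw [A_cc, if_neg h, B_cons, if_neg h, hs]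
      refine ⟨h1, ?_, ?_⟩
      · rw [h2]; simp; ring
      · rw [h3]; simp; push_cast; ring

-- ===== VERDICT (by name: the statement is the Claim_ definition above) =====
theorem solution_spec : Claim_equal_solution := by
  unfold Claim_equal_solution
  intro S _
  unfold Spec_solution solution solution_alt
  cases hS : S.toList with
  | nil => simp [solLoopA]
  | cons c rest =>
    have hstart : solLoopA (c :: rest) 0 [] none 0 = solLoopA rest 0 [] (some c) 1 ∨ rest = [] := by
      cases rest with
      | nil => exact Or.inr rfl
      | cons d l' => exact Or.inl (by simp [solLoopA])
    cases rest with
    | nil =>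
      have hA : solLoopA [c] 0 [] none 0 = (1, [1]) := by simp [solLoopA]
      simp [hA, B_nil]
    | cons d l' =>
      obtain ⟨h1, h2, h3⟩ := main_lemma l' d c 1 0 []
      have hstep : solLoopA (c :: d :: l') 0 [] none 0 = solLoopA (d :: l') 0 [] (some c) 1 := by
        simp [solLoopA]
      simp only [hstep, foldl_sub]
      rw [h1, h2, h3]
      simp; ring
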